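-- pv_equiv track=rewrite | github.com/unrealda/ising-visualizer2 | ising_model.py | square_neighbors
-- ===== SOURCE A (Python) =====
-- def square_neighbors(L):
--     N = L * L
--     site_dic = {}
--     x_y_dic = []
--
--     for j in range(N):
--         row = j // L
--         col = j % L
--         key = f"{row},{col}"
--         site_dic[key] = j
--         x_y_dic.append([row, col])
--
--     nbr = []
--     for j in range(N):
--         row, col = x_y_dic[j]
--         neighbors = [
--             site_dic.get(f"{row},{(col + 1) % L}"),
--             site_dic.get(f"{(row + 1) % L},{col}"),
--             site_dic.get(f"{row},{(col - 1) % L}"),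
--             site_dic.get(f"{(row - 1) % L},{col}")
--         ]
--         nbr.append(neighbors)
--
--     return nbr, site_dic, x_y_dic
-- ===== SOURCE B (Python) =====
-- def square_neighbors(L):
--     N = L * L
--     nbr = []
--     site_dic = {}
--     x_y_dic = []
--     for j in range(N):
--         row = j // L
--         col = j % L
--         site_dic[f"{row},{col}"] = j
--         x_y_dic.append([row, col])
--         nbr.append([
--             row * L + (col + 1) % L,
--             ((row + 1) % L) * L + col,
--             row * L + (col - 1) % L,
--             ((row - 1) % L) * L + col,
--         ])
--     return nbr, site_dic, x_y_dic
-- ===== Notes on version B (the rewrite author's own statement) =====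
-- stated objective: simpler
-- what changed: Single pass over j in range(N) that fills nbr, site_dic and x_y_dic together, computing each neighbor index by closed-form modular arithmetic (row*L+(col+1)%L, ...) instead of A's second scan with f-string dict lookups.
import Mathlib
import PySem

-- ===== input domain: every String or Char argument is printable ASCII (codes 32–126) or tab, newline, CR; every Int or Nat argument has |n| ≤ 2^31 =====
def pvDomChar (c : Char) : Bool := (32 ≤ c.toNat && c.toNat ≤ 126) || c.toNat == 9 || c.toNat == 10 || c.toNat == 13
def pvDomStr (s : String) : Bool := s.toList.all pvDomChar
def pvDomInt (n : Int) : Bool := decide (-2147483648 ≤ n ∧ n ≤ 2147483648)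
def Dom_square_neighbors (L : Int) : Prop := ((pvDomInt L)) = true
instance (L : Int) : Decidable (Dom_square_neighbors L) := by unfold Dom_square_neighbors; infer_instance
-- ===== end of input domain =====

-- B fuses A's two scans into one pass that computes each neighbor index by closed-form
-- modular arithmetic instead of A's f-string dict lookups (objective: simpler; same cost).

-- f"{row},{col}" = str(row) + "," + str(col), built on List Char as PySem prescribes (exact)
def pvKey (row col : Int) : String :=
  String.ofList (PySem.Int.toChars row ++ ',' :: PySem.Int.toChars col)

-- ===== PORT A =====
-- Python's site_dic.get(key) yields Optional[int]; inside Pre_ every looked-up key is present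
-- (proved below), so the total form Dict.getD … 0 is exact there; likewise row, col = x_y_dic[j]
-- is always in range inside the loop, ported with pyGetD.
def square_neighbors (L : Int) : List (List Int) × (List (String × Int)) × List (List Int) :=
  let N := L * L
  let p := (PySem.List.pyRange 0 N).foldl
    (fun (st : PySem.Dict String Int × List (List Int)) j =>
      let row := PySem.Int.floordiv j L
      let col := PySem.Int.mod j L
      (st.1.insert (pvKey row col) j, st.2 ++ [[row, col]]))
    (PySem.Dict.empty, [])
  let site_dic := p.1
  let x_y_dic := p.2
  let nbr := (PySem.List.pyRange 0 N).foldl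
    (fun acc j =>
      let rc := PySem.List.pyGetD x_y_dic j []
      let row := PySem.List.pyGetD rc 0 0
      let col := PySem.List.pyGetD rc 1 0
      acc ++ [[site_dic.getD (pvKey row (PySem.Int.mod (col + 1) L)) 0,
               site_dic.getD (pvKey (PySem.Int.mod (row + 1) L) col) 0,
               site_dic.getD (pvKey row (PySem.Int.mod (col - 1) L)) 0,
               site_dic.getD (pvKey (PySem.Int.mod (row - 1) L) col) 0]])
    []
  (nbr, site_dic.items, x_y_dic)

-- ===== PORT B =====
def square_neighbors_alt (L : Int) : List (List Int) × (List (String × Int)) × List (List Int) :=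
  let N := L * L
  let p := (PySem.List.pyRange 0 N).foldl
    (fun (st : List (List Int) × PySem.Dict String Int × List (List Int)) j =>
      let row := PySem.Int.floordiv j L
      let col := PySem.Int.mod j L
      (st.1 ++ [[row * L + PySem.Int.mod (col + 1) L,
                 PySem.Int.mod (row + 1) L * L + col,
                 row * L + PySem.Int.mod (col - 1) L,
                 PySem.Int.mod (row - 1) L * L + col]],
       st.2.1.insert (pvKey row col) j,
       st.2.2 ++ [[row, col]]))
    ([], PySem.Dict.empty, [])
  (p.1, p.2.1.items, p.2.2)

-- ===== PRECONDITION & SPEC =====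
-- Pre_ excludes L ≤ -2, where Python's floor division/modulo with the negative modulus makes
-- some neighbor keys miss the dict, so A's neighbor lists contain None — not an int, hence
-- not a value of the declared List (List Int) type.
def Pre_square_neighbors (L : Int) : Prop := -1 ≤ L
instance (L : Int) : Decidable (Pre_square_neighbors L) := by unfold Pre_square_neighbors; infer_instance
def pvWitness_square_neighbors : Int := (3)

def Spec_square_neighbors (L : Int) (out : List (List Int) × (List (String × Int)) × List (List Int)) : Prop := out = square_neighbors_alt L
instance (L : Int) (out : List (List Int) × (List (String × Int)) × List (List Int)) : Decidable (Spec_square_neighbors L out) := by unfold Spec_square_neighbors; infer_instance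

-- ===== CLAIM (what is proved, stated in full; the proofs are below) =====
def Claim_equal_square_neighbors : Prop := ∀ (L : Int), Dom_square_neighbors L → Pre_square_neighbors L → Spec_square_neighbors L (square_neighbors L)

-- ===== LEMMAS AND PROOFS =====

-- no decimal digit's character is ',' and Nat.digitChar is injective below 10 (finite check)
theorem pv_digitChar_facts : (∀ a < 10, ∀ b < 10, Nat.digitChar a = Nat.digitChar b → a = b) ∧
    (∀ a < 10, Nat.digitChar a ≠ ',') := by decide

theorem pv_toDigits_ne_nil (n : Nat) : Nat.toDigits 10 n ≠ [] := by
  rw [Nat.toDigits_eq_if (by norm_num)]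
  split <;> simp

theorem pv_comma_not_mem_toDigits (n : Nat) : ',' ∉ Nat.toDigits 10 n := by
  induction n using Nat.strong_induction_on with
  | _ n ih =>
    rw [Nat.toDigits_eq_if (by norm_num)]
    split
    · next h =>
      simpa using fun hc => (pv_digitChar_facts.2 n h) hc.symm
    · next h =>
      intro hc
      rcases List.mem_append.mp hc with hc | hc
      · exact ih (n / 10) (Nat.div_lt_self (by omega) (by norm_num)) hc
      · have : ',' = Nat.digitChar (n % 10) := by simpa using hc
        exact (pv_digitChar_facts.2 (n % 10) (by omega)) this.symm

theorem pv_toDigits_inj (a : Nat) : ∀ b, Nat.toDigits 10 a = Nat.toDigits 10 b → a = b := by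
  induction a using Nat.strong_induction_on with
  | _ a ih =>
    intro b h
    rw [Nat.toDigits_eq_if (n := a) (by norm_num), Nat.toDigits_eq_if (n := b) (by norm_num)] at h
    by_cases ha : a < 10 <;> by_cases hb : b < 10
    · rw [if_pos ha, if_pos hb] at h
      exact pv_digitChar_facts.1 a ha b hb (by simpa using h)
    · rw [if_pos ha, if_neg hb] at h
      have := congrArg List.length h
      have hne := pv_toDigits_ne_nil (b / 10)
      simp at this
      cases hx : Nat.toDigits 10 (b / 10) with
      | nil => exact absurd hx hne
      | cons x xs => rw [hx] at this; simp at this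
    · rw [if_neg ha, if_pos hb] at h
      have := congrArg List.length h
      have hne := pv_toDigits_ne_nil (a / 10)
      simp at this
      cases hx : Nat.toDigits 10 (a / 10) with
      | nil => exact absurd hx hne
      | cons x xs => rw [hx] at this; simp at this
    · rw [if_neg ha, if_neg hb] at h
      have hlen : [Nat.digitChar (a % 10)].length = [Nat.digitChar (b % 10)].length := rfl
      obtain ⟨h1, h2⟩ := List.append_inj' h hlen
      have hdiv : a / 10 = b / 10 :=
        ih (a / 10) (Nat.div_lt_self (by omega) (by norm_num)) (b / 10) h1
      have hmod : a % 10 = b % 10 :=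
        pv_digitChar_facts.1 (a % 10) (by omega) (b % 10) (by omega) (by simpa using h2)
      omega

-- splitting two char lists at their (unique) first comma
theorem pv_split_comma (xs : List Char) : ∀ (xs' ys ys' : List Char), ',' ∉ xs → ',' ∉ xs' →
    xs ++ ',' :: ys = xs' ++ ',' :: ys' → xs = xs' ∧ ys = ys' := by
  induction xs with
  | nil =>
    intro xs' ys ys' _ hx' h
    cases xs' with
    | nil => simpa using h
    | cons a t =>
      simp at h
      exact absurd (by simp [← h.1]) hx'
  | cons a t ih =>
    intro xs' ys ys' hx hx' h
    cases xs' with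
    | nil =>
      simp at h
      exact absurd (by simp [h.1]) hx
    | cons a' t' =>
      simp at h
      obtain ⟨h1, h2⟩ := ih t' ys ys' (by simp at hx; exact hx.2) (by simp at hx'; exact hx'.2) h.2
      exact ⟨by rw [h.1, h1], h2⟩

theorem pv_toChars_nonneg (r : Int) (hr : 0 ≤ r) :
    PySem.Int.toChars r = Nat.toDigits 10 r.toNat := by
  simp [PySem.Int.toChars, not_lt.mpr hr]

theorem pvKey_inj (r c r' c' : Int) (hr : 0 ≤ r) (hc : 0 ≤ c) (hr' : 0 ≤ r') (hc' : 0 ≤ c')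
    (h : pvKey r c = pvKey r' c') : r = r' ∧ c = c' := by
  unfold pvKey at h
  have h2 := String.ofList_inj.mp h
  rw [pv_toChars_nonneg r hr, pv_toChars_nonneg c hc, pv_toChars_nonneg r' hr',
      pv_toChars_nonneg c' hc'] at h2
  obtain ⟨h3, h4⟩ := pv_split_comma _ _ _ _ (pv_comma_not_mem_toDigits _)
    (pv_comma_not_mem_toDigits _) h2
  have := pv_toDigits_inj _ _ h3
  have := pv_toDigits_inj _ _ h4
  omega

-- the site dictionary both passes build
def pvSiteD (L : Int) : PySem.Dict String Int :=
  (PySem.List.pyRange 0 (L * L)).foldl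
    (fun d j => d.insert (pvKey (PySem.Int.floordiv j L) (PySem.Int.mod j L)) j)
    PySem.Dict.empty

theorem pv_rowf_bounds (L j : Int) (hL : 0 < L) (hj0 : 0 ≤ j) (hjN : j < L * L) :
    0 ≤ PySem.Int.floordiv j L ∧ PySem.Int.floordiv j L < L := by
  constructor
  · rw [PySem.Int.le_floordiv_iff_mul_le hL]; omega
  · rw [PySem.Int.floordiv_lt_iff_lt_mul hL]; exact hjN

theorem pv_key_eval (L r c : Int) (hL : 0 < L) (_hr0 : 0 ≤ r) (_hrL : r < L)
    (hc0 : 0 ≤ c) (hcL : c < L) :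
    PySem.Int.floordiv (r * L + c) L = r ∧ PySem.Int.mod (r * L + c) L = c := by
  constructor
  · rw [PySem.Int.floordiv_eq_iff_of_pos hL]
    constructor <;> nlinarith
  · rw [PySem.Int.mod_eq_emod_of_pos hL]
    have : r * L + c = c + L * r := by ring
    rw [this, Int.add_mul_emod_self_left]
    exact Int.emod_eq_of_lt hc0 hcL

theorem pv_siteD_items (L : Int) (hL : 0 < L) :
    (pvSiteD L).items = (PySem.List.pyRange 0 (L * L)).map
      (fun j => (pvKey (PySem.Int.floordiv j L) (PySem.Int.mod j L), j)) := by
  unfold pvSiteD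
  rw [PySem.Dict.items_foldl_insert_fresh _ _ _ _ (fun a _ => PySem.Dict.contains_empty _)]
  · have : PySem.Dict.empty.items = ([] : List (String × Int)) := rfl
    rw [this, List.nil_append]
  · apply List.Nodup.map_on
    · intro x hx y hy hkey
      have hx' := (PySem.List.mem_pyRange_one.mp hx)
      have hy' := (PySem.List.mem_pyRange_one.mp hy)
      have hxb := pv_rowf_bounds L x hL hx'.1 hx'.2
      have hyb := pv_rowf_bounds L y hL hy'.1 hy'.2
      have hxc := PySem.Int.mod_nonneg x hL
      have hyc := PySem.Int.mod_nonneg y hL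
      obtain ⟨e1, e2⟩ := pvKey_inj _ _ _ _ hxb.1 hxc hyb.1 hyc hkey
      have hhx := PySem.Int.floordiv_mul_add_mod x L
      have hhy := PySem.Int.floordiv_mul_add_mod y L
      rw [← hhx, ← hhy, e1, e2]
    · exact PySem.List.nodup_pyRange_one 0 (L * L)

theorem pv_siteD_nodup_keys (L : Int) : (pvSiteD L).keys.Nodup := by
  unfold pvSiteD
  exact PySem.Dict.nodup_keys_foldl_insert_key _ _ _ _ PySem.Dict.nodup_keys_empty

theorem pv_siteD_getD (L r c : Int) (hL : 0 < L) (hr0 : 0 ≤ r) (hrL : r < L)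
    (hc0 : 0 ≤ c) (hcL : c < L) :
    (pvSiteD L).getD (pvKey r c) 0 = r * L + c := by
  have hmem : (r * L + c) ∈ PySem.List.pyRange 0 (L * L) := by
    rw [PySem.List.mem_pyRange_one]
    constructor
    · nlinarith
    · nlinarith
  have hkey := pv_key_eval L r c hL hr0 hrL hc0 hcL
  have hitems : (pvKey r c, r * L + c) ∈ (pvSiteD L).items := by
    rw [pv_siteD_items L hL]
    refine List.mem_map.mpr ⟨r * L + c, hmem, ?_⟩
    rw [hkey.1, hkey.2]
  exact PySem.Dict.getD_of_mem_items (pvSiteD L) hitems (pv_siteD_nodup_keys L) 0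

theorem pv_main (L : Int) (hL : 0 < L) : square_neighbors L = square_neighbors_alt L := by
  simp only [square_neighbors, square_neighbors_alt]
  simp only [PySem.List.foldl_prod_mk
      (fun (d : PySem.Dict String Int) (j : Int) => d.insert (pvKey (PySem.Int.floordiv j L) (PySem.Int.mod j L)) j)
      (fun (l : List (List Int)) (j : Int) => l ++ [[PySem.Int.floordiv j L, PySem.Int.mod j L]])]
  simp only [PySem.List.foldl_prod_mk
      (fun (l : List (List Int)) (j : Int) => l ++
        [[PySem.Int.floordiv j L * L + PySem.Int.mod (PySem.Int.mod j L + 1) L,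
          PySem.Int.mod (PySem.Int.floordiv j L + 1) L * L + PySem.Int.mod j L,
          PySem.Int.floordiv j L * L + PySem.Int.mod (PySem.Int.mod j L - 1) L,
          PySem.Int.mod (PySem.Int.floordiv j L - 1) L * L + PySem.Int.mod j L]])
      (fun (st : PySem.Dict String Int × List (List Int)) (j : Int) =>
        (st.1.insert (pvKey (PySem.Int.floordiv j L) (PySem.Int.mod j L)) j,
         st.2 ++ [[PySem.Int.floordiv j L, PySem.Int.mod j L]]))]
  simp only [PySem.List.foldl_prod_mk
      (fun (d : PySem.Dict String Int) (j : Int) => d.insert (pvKey (PySem.Int.floordiv j L) (PySem.Int.mod j L)) j)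
      (fun (l : List (List Int)) (j : Int) => l ++ [[PySem.Int.floordiv j L, PySem.Int.mod j L]])]
  refine Prod.ext ?_ rfl
  simp only [PySem.List.foldl_append_singleton_eq_map
      (fun (j : Int) => [PySem.Int.floordiv j L, PySem.Int.mod j L])]
  simp only [List.nil_append]
  rw [PySem.List.foldl_append_singleton_eq_map
      (fun (j : Int) =>
        [PySem.Int.floordiv j L * L + PySem.Int.mod (PySem.Int.mod j L + 1) L,
         PySem.Int.mod (PySem.Int.floordiv j L + 1) L * L + PySem.Int.mod j L,
         PySem.Int.floordiv j L * L + PySem.Int.mod (PySem.Int.mod j L - 1) L,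
         PySem.Int.mod (PySem.Int.floordiv j L - 1) L * L + PySem.Int.mod j L])]
  rw [PySem.List.foldl_append_singleton_eq_map
      (fun (j : Int) =>
        [(List.foldl (fun d j => d.insert (pvKey (PySem.Int.floordiv j L) (PySem.Int.mod j L)) j) PySem.Dict.empty
            (PySem.List.pyRange 0 (L * L))).getD
          (pvKey (PySem.List.pyGetD (PySem.List.pyGetD
              (List.map (fun j => [PySem.Int.floordiv j L, PySem.Int.mod j L]) (PySem.List.pyRange 0 (L * L))) j []) 0 0)
            (PySem.Int.mod (PySem.List.pyGetD (PySem.List.pyGetD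
              (List.map (fun j => [PySem.Int.floordiv j L, PySem.Int.mod j L]) (PySem.List.pyRange 0 (L * L))) j []) 1 0 + 1) L)) 0,
         (List.foldl (fun d j => d.insert (pvKey (PySem.Int.floordiv j L) (PySem.Int.mod j L)) j) PySem.Dict.empty
            (PySem.List.pyRange 0 (L * L))).getD
          (pvKey (PySem.Int.mod (PySem.List.pyGetD (PySem.List.pyGetD
              (List.map (fun j => [PySem.Int.floordiv j L, PySem.Int.mod j L]) (PySem.List.pyRange 0 (L * L))) j []) 0 0 + 1) L)
            (PySem.List.pyGetD (PySem.List.pyGetD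
              (List.map (fun j => [PySem.Int.floordiv j L, PySem.Int.mod j L]) (PySem.List.pyRange 0 (L * L))) j []) 1 0)) 0,
         (List.foldl (fun d j => d.insert (pvKey (PySem.Int.floordiv j L) (PySem.Int.mod j L)) j) PySem.Dict.empty
            (PySem.List.pyRange 0 (L * L))).getD
          (pvKey (PySem.List.pyGetD (PySem.List.pyGetD
              (List.map (fun j => [PySem.Int.floordiv j L, PySem.Int.mod j L]) (PySem.List.pyRange 0 (L * L))) j []) 0 0)
            (PySem.Int.mod (PySem.List.pyGetD (PySem.List.pyGetD
              (List.map (fun j => [PySem.Int.floordiv j L, PySem.Int.mod j L]) (PySem.List.pyRange 0 (L * L))) j []) 1 0 - 1) L)) 0,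
         (List.foldl (fun d j => d.insert (pvKey (PySem.Int.floordiv j L) (PySem.Int.mod j L)) j) PySem.Dict.empty
            (PySem.List.pyRange 0 (L * L))).getD
          (pvKey (PySem.Int.mod (PySem.List.pyGetD (PySem.List.pyGetD
              (List.map (fun j => [PySem.Int.floordiv j L, PySem.Int.mod j L]) (PySem.List.pyRange 0 (L * L))) j []) 0 0 - 1) L)
            (PySem.List.pyGetD (PySem.List.pyGetD
              (List.map (fun j => [PySem.Int.floordiv j L, PySem.Int.mod j L]) (PySem.List.pyRange 0 (L * L))) j []) 1 0)) 0])]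
  simp only [List.nil_append]
  apply List.map_congr_left
  intro j hj
  obtain ⟨hj0, hjN⟩ := PySem.List.mem_pyRange_one.mp hj
  rw [PySem.List.pyGetD_map_pyRange_of_nonneg _ _ _ _ hj0 hjN]
  have hg0 : ∀ a b : Int, PySem.List.pyGetD [a, b] 0 0 = a := fun a b => rfl
  have hg1 : ∀ a b : Int, PySem.List.pyGetD [a, b] 1 0 = b := fun a b => rfl
  rw [hg0, hg1]
  have hs : List.foldl (fun (d : PySem.Dict String Int) j =>
      d.insert (pvKey (PySem.Int.floordiv j L) (PySem.Int.mod j L)) j) PySem.Dict.empty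
      (PySem.List.pyRange 0 (L * L)) = pvSiteD L := rfl
  rw [hs]
  obtain ⟨hr0, hrL⟩ := pv_rowf_bounds L j hL hj0 hjN
  have hc0 := PySem.Int.mod_nonneg j hL
  have hcL := PySem.Int.mod_lt j hL
  rw [pv_siteD_getD L _ _ hL hr0 hrL (PySem.Int.mod_nonneg _ hL) (PySem.Int.mod_lt _ hL),
      pv_siteD_getD L _ _ hL (PySem.Int.mod_nonneg _ hL) (PySem.Int.mod_lt _ hL) hc0 hcL,
      pv_siteD_getD L _ _ hL hr0 hrL (PySem.Int.mod_nonneg _ hL) (PySem.Int.mod_lt _ hL),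
      pv_siteD_getD L _ _ hL (PySem.Int.mod_nonneg _ hL) (PySem.Int.mod_lt _ hL) hc0 hcL]

-- ===== VERDICT (by name: the statement is the Claim_ definition above) =====
theorem square_neighbors_spec : Claim_equal_square_neighbors := by
  intro L _ hpre
  unfold Spec_square_neighbors
  have hpre' : -1 ≤ L := hpre
  rcases lt_trichotomy L 0 with h | h | h
  · have hL1 : L = -1 := by omega
    subst hL1; decide
  · subst h; decide
  · exact pv_main L h
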